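-- pv_equiv track=rewrite | github.com/HassounLab/ASAP-SML | ASAP/SequenceAndFeatureAnalysis.py | RankFisherFS
-- ===== SOURCE A (Python) =====
-- def RankFisherFS(Fpvalue, importances):
--     RankFpvalue =[-1 for i in range(len(Fpvalue))]
--     s_Fpvalue = sorted(range(len(Fpvalue)), key=lambda k: Fpvalue[k])
--     for rank, idx in enumerate(s_Fpvalue):
--         RankFpvalue[idx] = rank+1 # real rank start from 1
--
--     RankImportance =[-1 for i in range(len(importances))]
--     s_Importance = sorted(range(len(importances)), key=lambda k: importances[k], reverse = True)
--     for rank, idx in enumerate(s_Importance):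
--         RankImportance[idx] = rank+1 # real rank start from 1
--     return RankFpvalue, RankImportance
-- ===== SOURCE B (Python) =====
-- def _ranks(xs, descending):
--     # rank of element i = 1 + number of elements that come strictly before it
--     # in a stable sort: strictly better value, or equal value at a smaller index
--     return [1 + sum(1 for j, y in enumerate(xs)
--                     if (y > x if descending else y < x) or (y == x and j < i))
--             for i, x in enumerate(xs)]
--
-- def RankFisherFS(Fpvalue, importances):
--     return _ranks(Fpvalue, False), _ranks(importances, True)
-- ===== Notes on version B (the rewrite author's own statement) =====
-- stated objective: alternative
-- what changed: Replaces sort-then-scatter (argsort into a preallocated rank array) by a direct counting formula: each element's rank is 1 + the number of elements that strictly precede it in a stable sort (strictly better value, or equal value at a smaller index), computed with no sorting and no mutation.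
import Mathlib
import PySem

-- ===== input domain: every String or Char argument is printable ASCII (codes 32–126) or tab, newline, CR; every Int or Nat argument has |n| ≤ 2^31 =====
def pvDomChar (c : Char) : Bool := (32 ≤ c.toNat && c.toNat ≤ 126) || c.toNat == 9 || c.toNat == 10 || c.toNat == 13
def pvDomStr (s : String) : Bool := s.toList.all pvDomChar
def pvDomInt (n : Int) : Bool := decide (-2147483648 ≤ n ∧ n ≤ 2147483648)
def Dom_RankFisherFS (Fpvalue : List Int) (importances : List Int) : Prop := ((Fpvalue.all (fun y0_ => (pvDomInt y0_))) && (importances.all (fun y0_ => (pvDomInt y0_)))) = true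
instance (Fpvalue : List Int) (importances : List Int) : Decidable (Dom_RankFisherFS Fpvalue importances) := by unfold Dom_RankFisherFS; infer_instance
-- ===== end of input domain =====

-- B replaces A's sort-then-scatter by a direct stable-rank counting formula (alternative decomposition, no sorting, no mutation).

-- ===== PORT A =====
-- literal port of A: preallocate [-1]*n, argsort the indices (stable, by value; reversed
-- for importances), then scatter rank+1 into the preallocated array.
def RankFisherFS (Fpvalue : List Int) (importances : List Int) : List Int × List Int :=
  let rankFpvalue0 : List Int :=
    (PySem.List.pyRange 0 (Fpvalue.length : Int) 1).map (fun _ => -1)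
  let sFpvalue := PySem.List.sorted (PySem.List.pyRange 0 (Fpvalue.length : Int) 1)
    (fun k => PySem.List.pyGetD Fpvalue k 0) false
  let rankFpvalue := (PySem.List.enumerate sFpvalue 0).foldl
    (fun acc p => PySem.List.pySetD acc p.2 (p.1 + 1)) rankFpvalue0
  let rankImportance0 : List Int :=
    (PySem.List.pyRange 0 (importances.length : Int) 1).map (fun _ => -1)
  let sImportance := PySem.List.sorted (PySem.List.pyRange 0 (importances.length : Int) 1)
    (fun k => PySem.List.pyGetD importances k 0) true
  let rankImportance := (PySem.List.enumerate sImportance 0).foldl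
    (fun acc p => PySem.List.pySetD acc p.2 (p.1 + 1)) rankImportance0
  (rankFpvalue, rankImportance)

-- ===== PORT B =====
-- literal port of B's helper _ranks: rank of element i = 1 + number of elements that come
-- strictly before it in a stable sort (strictly better value, or equal value at a smaller index).
def ranksByCount (xs : List Int) (descending : Bool) : List Int :=
  (PySem.List.enumerate xs 0).map (fun p =>
    1 + (((PySem.List.enumerate xs 0).filter (fun q =>
      (if descending then decide (q.2 > p.2) else decide (q.2 < p.2))
        || (q.2 == p.2 && decide (q.1 < p.1)))).length : Int))

def RankFisherFS_alt (Fpvalue : List Int) (importances : List Int) : List Int × List Int :=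
  (ranksByCount Fpvalue false, ranksByCount importances true)

-- ===== PRECONDITION & SPEC =====
def Spec_RankFisherFS (Fpvalue : List Int) (importances : List Int) (out : List Int × List Int) : Prop := out = RankFisherFS_alt Fpvalue importances
instance (Fpvalue : List Int) (importances : List Int) (out : List Int × List Int) : Decidable (Spec_RankFisherFS Fpvalue importances out) := by unfold Spec_RankFisherFS; infer_instance

-- ===== CLAIM (what is proved, stated in full; the proofs are below) =====
def Claim_equal_RankFisherFS : Prop := ∀ (Fpvalue : List Int) (importances : List Int), Dom_RankFisherFS Fpvalue importances → Spec_RankFisherFS Fpvalue importances (RankFisherFS Fpvalue importances)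

-- ===== LEMMAS AND PROOFS =====

-- the strict "comes before in the stable ascending sort by key k" order on indices
def lexB (k : Int → Int) (a b : Int) : Bool :=
  decide (k a < k b) || (k a == k b && decide (a < b))

theorem lexB_asymm (k : Int → Int) (a b : Int) (h : lexB k a b = true) : lexB k b a = false := by
  simp only [lexB, Bool.or_eq_true, Bool.and_eq_true, decide_eq_true_eq, beq_iff_eq,
    Bool.or_eq_false_iff, Bool.and_eq_false_iff, decide_eq_false_iff_not, beq_eq_false_iff_ne] at *
  omega

-- insertBy's two defining equations (PySem.List.insertBy is transparent)
theorem insertBy_nil (before : Int → Int → Bool) (x : Int) :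
    PySem.List.insertBy before x [] = [x] := rfl

theorem insertBy_cons (before : Int → Int → Bool) (x y : Int) (ys : List Int) :
    PySem.List.insertBy before x (y :: ys) =
      if before x y then x :: y :: ys else y :: PySem.List.insertBy before x ys := rfl

-- inserting a fresh largest-index element keeps the list sorted in the lexB order
theorem pairwise_insertBy (k : Int → Int) (x : Int) (ys : List Int)
    (hys : ys.Pairwise (fun a b => lexB k a b = true)) (hlt : ∀ y ∈ ys, y < x) :
    (PySem.List.insertBy (fun a b => decide (k a < k b)) x ys).Pairwise
      (fun a b => lexB k a b = true) := by
  induction ys with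
  | nil => simp [insertBy_nil]
  | cons y ys ih =>
    rw [insertBy_cons]
    rcases List.pairwise_cons.mp hys with ⟨hy, hys'⟩
    by_cases hxy : k x < k y
    · simp only [hxy, decide_true, if_true]
      refine List.pairwise_cons.mpr ⟨?_, hys⟩
      intro z hz
      have hkz : k y ≤ k z ∨ y = z := by
        rcases List.mem_cons.mp hz with h | h
        · right; exact h.symm
        · have := hy z h
          simp only [lexB, Bool.or_eq_true, Bool.and_eq_true, decide_eq_true_eq,
            beq_iff_eq] at this
          left; omega
      simp only [lexB, Bool.or_eq_true, decide_eq_true_eq]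
      left
      rcases hkz with h | h
      · omega
      · rw [← h]; exact hxy
    · simp only [hxy, decide_false, Bool.false_eq_true]
      refine List.pairwise_cons.mpr ⟨?_, ih hys' (fun z hz => hlt z (List.mem_cons_of_mem y hz))⟩
      intro z hz
      rcases (PySem.List.mem_insertBy _ _ _ _).mp hz with h | h
      · rw [h]
        simp only [lexB, Bool.or_eq_true, Bool.and_eq_true, decide_eq_true_eq, beq_iff_eq]
        have hyx : y < x := hlt y List.mem_cons_self
        omega
      · exact hy z h
  
-- the whole insertion-sort fold is sorted in the lexB order
theorem pairwise_foldl_insertBy (k : Int → Int) (xs : List Int) : ∀ (acc : List Int),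
    xs.Pairwise (· < ·) → acc.Pairwise (fun a b => lexB k a b = true) →
    (∀ y ∈ acc, ∀ x ∈ xs, y < x) →
    (xs.foldl (fun acc x => PySem.List.insertBy (fun a b => decide (k a < k b)) x acc)
      acc).Pairwise (fun a b => lexB k a b = true) := by
  induction xs with
  | nil => intro acc _ hacc _; simpa using hacc
  | cons x xs ih =>
    intro acc hxs hacc hcross
    rcases List.pairwise_cons.mp hxs with ⟨hx, hxs'⟩
    simp only [List.foldl_cons]
    apply ih _ hxs'
    · exact pairwise_insertBy k x acc hacc (fun y hy => hcross y hy x List.mem_cons_self)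
    · intro y hy z hz
      rcases (PySem.List.mem_insertBy _ _ _ _).mp hy with h | h
      · subst h; exact hx z hz
      · exact hcross y h z (List.mem_cons_of_mem x hz)

-- in a lexB-sorted list, the position of i is the number of elements lexB-below i
theorem idxOf_eq_countP (k : Int → Int) (s : List Int)
    (hs : s.Pairwise (fun a b => lexB k a b = true)) (i : Int) (hi : i ∈ s) :
    (s.idxOf i : Nat) = s.countP (fun j => lexB k j i) := by
  induction s with
  | nil => cases hi
  | cons x s ih =>
    rcases List.pairwise_cons.mp hs with ⟨hx, hs'⟩
    by_cases hxi : x = i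
    · subst hxi
      rw [List.idxOf_cons_self, List.countP_cons]
      have h0 : s.countP (fun j => lexB k j x) = 0 := by
        rw [List.countP_eq_zero]
        intro a ha
        have := lexB_asymm k x a (hx a ha)
        simp [this]
      have hxx : lexB k x x = false := by
        simp [lexB]
      simp [h0, hxx]
    · have hi' : i ∈ s := by
        rcases List.mem_cons.mp hi with h | h
        · exact absurd h.symm hxi
        · exact h
      rw [List.idxOf_cons_ne s hxi, List.countP_cons]
      have hxilex : lexB k x i = true := hx i hi'
      rw [ih hs' hi', hxilex]
      simp

-- the scatter loop "for rank, idx in enumerate(s): acc[idx] = rank+1", element by element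
theorem scatter_getElem? (s : List Int) : ∀ (t : Int) (acc : List Int),
    (∀ x ∈ s, 0 ≤ x ∧ x < (acc.length : Int)) → s.Nodup → ∀ (i : Nat),
    ((PySem.List.enumerate s t).foldl
      (fun acc p => PySem.List.pySetD acc p.2 (p.1 + 1)) acc)[i]? =
    if (i : Int) ∈ s then some (t + (s.idxOf (i : Int) : Int) + 1) else acc[i]? := by
  induction s with
  | nil => intro t acc _ _ i; simp [PySem.List.enumerate]
  | cons x s ih =>
    intro t acc hb hnd i
    have hx := hb x List.mem_cons_self
    rcases List.nodup_cons.mp hnd with ⟨hxs, hnd'⟩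
    rw [PySem.List.enumerate_cons, List.foldl_cons]
    have hset : PySem.List.pySetD acc x (t + 1) = acc.set x.toNat (t + 1) :=
      PySem.List.pySetD_of_nonneg acc (t + 1) hx.1
    have hlen : (acc.set x.toNat (t + 1)).length = acc.length := by simp
    rw [hset, ih (t + 1) _ (by rw [hlen]; exact fun z hz => hb z (List.mem_cons_of_mem x hz)) hnd' i]
    by_cases hmem : (i : Int) ∈ s
    · have hne : (i : Int) ≠ x := fun h => hxs (h ▸ hmem)
      rw [if_pos hmem, if_pos (List.mem_cons_of_mem x hmem),
        List.idxOf_cons_ne s (fun h => hne h.symm)]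
      congr 1
      push_cast
      ring
    · rw [if_neg hmem]
      by_cases hix : (i : Int) = x
      · have hidx : i < acc.length := by omega
        have hxt : x.toNat = i := by omega
        rw [if_pos (by rw [hix]; exact List.mem_cons_self), hxt,
          List.getElem?_set_self hidx, ← hix, List.idxOf_cons_self]
        norm_num
      · have hne : ¬ ((i : Int) ∈ x :: s) := by
          intro h; rcases List.mem_cons.mp h with h | h
          · exact hix h
          · exact hmem h
        rw [if_neg hne, List.getElem?_set_ne (by omega)]

-- enumerate(xs) is the index range paired with lookups
theorem enumerate_eq_map (xs : List Int) : ∀ (t : Int),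
    PySem.List.enumerate xs t =
      (PySem.List.pyRange t (t + (xs.length : Int)) 1).map
        (fun j => (j, PySem.List.pyGetD xs (j - t) 0)) := by
  induction xs with
  | nil => intro t; simp [PySem.List.enumerate, PySem.List.pyRange_one_eq_nil]
  | cons x xs ih =>
    intro t
    have hb : t + (((x :: xs).length : Nat) : Int) = (t + 1) + (xs.length : Int) := by
      push_cast [List.length_cons]; ring
    rw [PySem.List.enumerate_cons, ih (t + 1), hb,
      PySem.List.pyRange_one_cons (show t < (t + 1) + (xs.length : Int) by omega)]
    simp only [List.map_cons]
    refine List.cons_eq_cons.mpr ⟨?_, ?_⟩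
    · simp [PySem.List.pyGetD_zero_cons]
    · apply List.map_congr_left
      intro j hj
      rcases PySem.List.mem_pyRange_one.mp hj with ⟨h1, h2⟩
      have e1 : PySem.List.pyGetD (x :: xs) (j - t) 0 = (x :: xs)[(j - t).toNat] :=
        PySem.List.pyGetD_eq_getElem _ _ (by omega) (by omega)
      have e2 : PySem.List.pyGetD xs (j - (t + 1)) 0 = xs[(j - (t + 1)).toNat] :=
        PySem.List.pyGetD_eq_getElem _ _ (by omega) (by omega)
      rw [e1, e2]
      congr 1
      have h3 : (j - t).toNat = (j - (t + 1)).toNat + 1 := by omega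
      rw [List.getElem_cons]
      simp [h3]

-- the core: A's sort-then-scatter (in insertion-sort foldl form) equals B's counting map
theorem core (xs : List Int) (k : Int → Int) :
    (PySem.List.enumerate
      ((PySem.List.pyRange 0 (xs.length : Int) 1).foldl
        (fun acc x => PySem.List.insertBy (fun a b => decide (k a < k b)) x acc) []) 0).foldl
      (fun acc p => PySem.List.pySetD acc p.2 (p.1 + 1))
      ((PySem.List.pyRange 0 (xs.length : Int) 1).map (fun _ => -1)) =
    (PySem.List.pyRange 0 (xs.length : Int) 1).map
      (fun i => 1 + (((PySem.List.pyRange 0 (xs.length : Int) 1).countP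
        (fun j => lexB k j i)) : Int)) := by
  set rg := PySem.List.pyRange 0 (xs.length : Int) 1 with hrg
  set s := rg.foldl (fun acc x => PySem.List.insertBy (fun a b => decide (k a < k b)) x acc) []
    with hs
  have hperm : s.Perm rg := by
    rw [hs, ← PySem.List.sorted_eq_foldl_insertBy]
    exact PySem.List.sorted_perm rg _ false
  have hpair : s.Pairwise (fun a b => lexB k a b = true) :=
    pairwise_foldl_insertBy k rg [] (PySem.List.pairwise_lt_pyRange_one 0 (xs.length : Int))
      List.Pairwise.nil (by intro y hy; cases hy)
  have hnd : s.Nodup := hperm.nodup_iff.mpr (PySem.List.nodup_pyRange_one 0 (xs.length : Int))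
  have hrglen : rg.length = xs.length := by
    rw [hrg, PySem.List.length_pyRange_one]; omega
  have hacclen : ((rg.map (fun _ => (-1 : Int))).length : Int) = (xs.length : Int) := by
    simp [hrglen]
  have hmem : ∀ x, x ∈ s ↔ (0 ≤ x ∧ x < (xs.length : Int)) := by
    intro x
    rw [hperm.mem_iff, hrg, PySem.List.mem_pyRange_one]
  apply List.ext_getElem?
  intro i
  rw [scatter_getElem? s 0 _ (by intro x hx; rw [hacclen]; exact (hmem x).mp hx) hnd i]
  by_cases hi : i < xs.length
  · have himem : (i : Int) ∈ s := (hmem i).mpr (by omega)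
    rw [if_pos himem]
    have hget : (rg.map (fun i => 1 + ((rg.countP (fun j => lexB k j i)) : Int)))[i]? =
        some (1 + ((rg.countP (fun j => lexB k j (i : Int))) : Int)) := by
      rw [List.getElem?_map, hrg, PySem.List.getElem?_pyRange_one,
        if_pos (show i < (((xs.length : Int)) - 0).toNat by omega)]
      simp
    rw [hget, idxOf_eq_countP k s hpair (i : Int) himem, hperm.countP_eq]
    congr 1
    omega
  · have himem : ¬ ((i : Int) ∈ s) := by
      rw [hmem]; omega
    rw [if_neg himem, List.getElem?_eq_none (by simpa [hrglen] using hi),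
      List.getElem?_eq_none (by simpa [hrglen] using hi)]

-- B's counting helper, rewritten as a map over the index range
theorem ranksByCount_eq (xs : List Int) (descending : Bool) (k : Int → Int)
    (hk : ∀ j, k j = if descending then -(PySem.List.pyGetD xs j 0) else PySem.List.pyGetD xs j 0) :
    ranksByCount xs descending =
    (PySem.List.pyRange 0 (xs.length : Int) 1).map
      (fun i => 1 + (((PySem.List.pyRange 0 (xs.length : Int) 1).countP
        (fun j => lexB k j i)) : Int)) := by
  unfold ranksByCount
  rw [enumerate_eq_map xs 0]
  simp only [zero_add, List.map_map]
  apply List.map_congr_left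
  intro i hi
  simp only [Function.comp_apply]
  congr 2
  simp only [← List.countP_eq_length_filter, List.countP_map]
  apply List.countP_congr
  intro j hj
  simp only [Function.comp_apply, sub_zero]
  simp only [lexB, Bool.or_eq_true, Bool.and_eq_true, decide_eq_true_eq, beq_iff_eq,
    gt_iff_lt, hk i, hk j]
  cases descending <;> simp

-- the reverse=True insertion fold is the ascending fold for the negated key
theorem rev_foldl_eq (xs : List Int) (key : Int → Int) :
    PySem.List.sorted xs key true =
      xs.foldl (fun acc x =>
        PySem.List.insertBy (fun a b => decide ((fun j => -(key j)) a < (fun j => -(key j)) b))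
          x acc) [] := by
  rw [PySem.List.sorted_rev_eq_foldl_insertBy]
  congr 1
  funext acc x
  congr 1
  funext a b
  simp

-- ===== VERDICT (by name: the statement is the Claim_ definition above) =====
theorem RankFisherFS_spec : Claim_equal_RankFisherFS := by
  intro Fpvalue importances _
  unfold Spec_RankFisherFS RankFisherFS RankFisherFS_alt
  simp only
  rw [Prod.mk.injEq]
  constructor
  · rw [PySem.List.sorted_eq_foldl_insertBy, core Fpvalue (fun j => PySem.List.pyGetD Fpvalue j 0),
      ranksByCount_eq Fpvalue false (fun j => PySem.List.pyGetD Fpvalue j 0) (by intro j; simp)]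
  · rw [rev_foldl_eq, core importances (fun j => -(PySem.List.pyGetD importances j 0)),
      ranksByCount_eq importances true (fun j => -(PySem.List.pyGetD importances j 0))
        (by intro j; simp)]
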